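-- pv_equiv track=rewrite | github.com/damtapr/xepelin-dashboard-mvp | build.py | excel_col_to_0idx
-- ===== SOURCE A (Python) =====
-- def excel_col_to_0idx(col: str) -> int:
--     """
--     'A' -> 0, 'B' -> 1, ..., 'Z' -> 25, 'AA' -> 26 ...
--     """
--     col = col.strip().upper()
--     n = 0
--     for ch in col:
--         if not ("A" <= ch <= "Z"):
--             raise ValueError(f"Excel column inválida: {col}")
--         n = n * 26 + (ord(ch) - ord("A") + 1)
--     return n - 1
-- ===== SOURCE B (Python) =====
-- def excel_col_to_0idx(col: str) -> int:
--     """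
--     'A' -> 0, 'B' -> 1, ..., 'Z' -> 25, 'AA' -> 26 ...
--     """
--     col = col.strip().upper()
--     if not all("A" <= ch <= "Z" for ch in col):
--         raise ValueError(f"Excel column inválida: {col}")
--     weights = []
--     w = 1
--     for _ in col:
--         weights.append(w)
--         w *= 26
--     return sum((ord(ch) - 64) * wt for ch, wt in zip(reversed(col), weights)) - 1
-- ===== Notes on version B (the rewrite author's own statement) =====
-- stated objective: alternative
-- what changed: Validation becomes one up-front pass and Horner's accumulator is replaced by staged passes: build a table of place weights [1,26,26^2,...], then sum digit*weight over zip(reversed(col), weights).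
-- outside the precondition, e.g. on excel_col_to_0idx('a1'): A raises ValueError, B raises ValueError
import Mathlib
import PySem

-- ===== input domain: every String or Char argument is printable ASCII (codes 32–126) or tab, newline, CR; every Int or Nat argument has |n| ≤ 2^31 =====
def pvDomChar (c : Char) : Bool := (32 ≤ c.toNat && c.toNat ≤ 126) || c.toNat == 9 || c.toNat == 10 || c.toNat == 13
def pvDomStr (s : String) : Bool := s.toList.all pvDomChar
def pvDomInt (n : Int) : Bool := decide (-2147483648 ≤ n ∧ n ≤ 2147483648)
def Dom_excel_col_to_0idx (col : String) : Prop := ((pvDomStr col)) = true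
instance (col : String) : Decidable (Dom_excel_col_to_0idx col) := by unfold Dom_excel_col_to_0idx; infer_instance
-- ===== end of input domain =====

-- B validates in one up-front pass, then builds a table of place weights [1, 26, 26^2, ...] and sums digit*weight over zip(reversed(col), weights) instead of A's Horner accumulator (alternative decomposition, same cost); Pre_ excludes inputs where A raises ValueError.


-- ===== PORT A =====
-- A's loop: n = n*26 + (ord(ch) - ord('A') + 1); the raise inside the loop is
-- represented by the validity guard (outside Pre_ the Python raises ValueError; 0 stands for the raise).
def pvHornerStep (n : Int) (ch : Char) : Int := n * 26 + ((ch.toNat : Int) - 65 + 1)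

def excel_col_to_0idx (col : String) : Int :=
  let c := (PySem.Str.upper (PySem.Str.strip col)).toList
  if c.all (fun ch => decide ('A' ≤ ch ∧ ch ≤ 'Z')) then c.foldl pvHornerStep 0 - 1
  else 0  -- Python raises ValueError here

-- ===== PORT B =====
-- weights.append(w); w *= 26
def pvWeightStep (st : List Int × Int) (_ch : Char) : List Int × Int :=
  (st.1 ++ [st.2], st.2 * 26)

def excel_col_to_0idx_alt (col : String) : Int :=
  let c := (PySem.Str.upper (PySem.Str.strip col)).toList
  if !(c.all (fun ch => decide ('A' ≤ ch ∧ ch ≤ 'Z'))) then 0  -- Python raises ValueError here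
  else
    let weights := (c.foldl pvWeightStep ([], 1)).1
    ((c.reverse.zip weights).map (fun q => ((q.1.toNat : Int) - 64) * q.2)).sum - 1

-- ===== PRECONDITION & SPEC =====
-- Pre_ excludes exactly the inputs (some non-letter after strip/upper) on which A raises ValueError.
def Pre_excel_col_to_0idx (col : String) : Prop :=
  ((PySem.Str.upper (PySem.Str.strip col)).toList.all (fun ch => decide ('A' ≤ ch ∧ ch ≤ 'Z'))) = true
instance (col : String) : Decidable (Pre_excel_col_to_0idx col) := by
  unfold Pre_excel_col_to_0idx; infer_instance
def pvWitness_excel_col_to_0idx : String := " ab "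

def Spec_excel_col_to_0idx (col : String) (out : Int) : Prop := out = excel_col_to_0idx_alt col
instance (col : String) (out : Int) : Decidable (Spec_excel_col_to_0idx col out) := by
  unfold Spec_excel_col_to_0idx; infer_instance

-- ===== CLAIM (what is proved, stated in full; the proofs are below) =====
def Claim_equal_excel_col_to_0idx : Prop := ∀ (col : String), Dom_excel_col_to_0idx col → Pre_excel_col_to_0idx col → Spec_excel_col_to_0idx col (excel_col_to_0idx col)

-- ===== LEMMAS AND PROOFS =====

-- the weight loop produces the geometric table p, p*26, p*26^2, …
theorem pvWeights_spec (l : List Char) (ws : List Int) (p : Int) :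
    (l.foldl pvWeightStep (ws, p)).1
      = ws ++ (List.range l.length).map (fun i => p * 26 ^ i) := by
  induction l generalizing ws p with
  | nil => simp
  | cons a t ih =>
    simp only [List.foldl_cons, pvWeightStep, ih, List.length_cons,
      List.range_succ_eq_map, List.map_cons, List.map_map]
    have hm : (List.range t.length).map ((fun i => p * 26 ^ i) ∘ Nat.succ)
        = (List.range t.length).map (fun i => p * 26 * 26 ^ i) := by
      apply List.map_congr_left; intro i _
      simp only [Function.comp, pow_succ]; ring
    rw [hm]
    simp

-- the weighted zip-sum over the reversed digits is Horner's value (scaled by the base weight p)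
theorem pvHorner_eq_zipsum (r : List Char) (p : Int) :
    r.reverse.foldl pvHornerStep 0 * p
      = ((r.zip ((List.range r.length).map (fun i => p * 26 ^ i))).map
          (fun q => ((q.1.toNat : Int) - 64) * q.2)).sum := by
  induction r generalizing p with
  | nil => simp
  | cons ch t ih =>
    rw [List.reverse_cons, List.foldl_append]
    simp only [List.length_cons, List.range_succ_eq_map, List.map_cons, List.map_map,
      List.zip_cons_cons, List.sum_cons, List.foldl_cons, List.foldl_nil, pvHornerStep]
    have hm : (List.range t.length).map ((fun i => p * 26 ^ i) ∘ Nat.succ)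
        = (List.range t.length).map (fun i => p * 26 * 26 ^ i) := by
      apply List.map_congr_left; intro i _
      simp only [Function.comp, pow_succ]; ring
    rw [hm, ← ih (p * 26)]
    ring

-- ===== VERDICT (by name: the statement is the Claim_ definition above) =====
theorem excel_col_to_0idx_spec : Claim_equal_excel_col_to_0idx := by
  intro col _ hpre
  unfold Spec_excel_col_to_0idx excel_col_to_0idx excel_col_to_0idx_alt
  unfold Pre_excel_col_to_0idx at hpre
  simp only []
  rw [if_pos hpre]
  simp only [hpre, Bool.not_true, Bool.false_eq_true, if_false]
  rw [pvWeights_spec, List.nil_append]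
  have h := pvHorner_eq_zipsum ((PySem.Str.upper (PySem.Str.strip col)).toList.reverse) 1
  rw [List.reverse_reverse, mul_one, List.length_reverse] at h
  rw [h]
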